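-- pv_equiv track=rewrite | github.com/albertopha/ds-algo | Algorithm/sorting/Groupanagrams.py | equals
-- ===== SOURCE A (Python) =====
-- def equals(word1, word2):
--     """
--     Equal if they are anagrams
--     :param word1: String
--     :param word2: String
--     :return: Boolean
--     """
--
--     hash_char = {}
--
--     for i in range(len(word1)):
--         curr = word1[i]
--
--         if curr in hash_char:
--             hash_char[curr] += 1
--         else:
--             hash_char[curr] = 1
--
--     for i in range(len(word2)):
--         curr = word2[i]
--
--         if curr not in hash_char:
--             return False
--         elif hash_char[curr] == 0:
--             return False
--         else:
--             hash_char[curr] -= 1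
--
--     return True
-- ===== SOURCE B (Python) =====
-- def equals(word1, word2):
--     c1 = {}
--     for ch in word1:
--         c1[ch] = c1.get(ch, 0) + 1
--     c2 = {}
--     for ch in word2:
--         c2[ch] = c2.get(ch, 0) + 1
--     return all(n <= c1.get(ch, 0) for ch, n in c2.items())
-- ===== Notes on version B (the rewrite author's own statement) =====
-- stated objective: alternative
-- what changed: Replaces A's single streaming decrement-and-bail pass over word2 (indexing by range(len)) with building two frequency tables for word1 and word2 and a final comparison pass checking c2[ch] <= c1.get(ch, 0) for every distinct char of word2.
import Mathlib
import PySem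

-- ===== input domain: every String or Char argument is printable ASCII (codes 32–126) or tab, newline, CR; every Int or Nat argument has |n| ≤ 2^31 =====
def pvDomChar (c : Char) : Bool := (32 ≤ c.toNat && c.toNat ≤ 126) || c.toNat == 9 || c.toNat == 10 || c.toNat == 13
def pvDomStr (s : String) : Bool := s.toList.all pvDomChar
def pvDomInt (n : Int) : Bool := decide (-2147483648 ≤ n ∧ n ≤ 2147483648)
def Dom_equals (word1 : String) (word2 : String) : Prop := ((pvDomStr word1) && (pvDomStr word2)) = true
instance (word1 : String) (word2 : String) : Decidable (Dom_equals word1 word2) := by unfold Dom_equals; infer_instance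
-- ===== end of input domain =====

-- B builds two frequency tables and compares them in a final pass, instead of A's
-- streaming decrement-and-bail loop over word2 (alternative decomposition, same cost).

-- ===== PORT A =====
-- second loop of A: walk word2's chars, bail with False on a missing or exhausted char
def equalsGo (cs : List Char) (d : PySem.Dict Char Int) : Bool :=
  match cs with
  | [] => true
  | c :: rest =>
    if !(d.contains c) then false
    else if d.getD c 0 == 0 then false
    else equalsGo rest (d.insert c (d.getD c 0 - 1))

def equals (word1 : String) (word2 : String) : Bool :=
  -- first loop: count word1's chars into hash_char
  let hash_char := word1.toList.foldl
    (fun d c => if d.contains c then d.insert c (d.getD c 0 + 1) else d.insert c 1)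
    (PySem.Dict.empty : PySem.Dict Char Int)
  equalsGo word2.toList hash_char

-- ===== PORT B =====
def equals_alt (word1 : String) (word2 : String) : Bool :=
  let c1 := word1.toList.foldl (fun d c => d.insert c (d.getD c 0 + 1)) (PySem.Dict.empty : PySem.Dict Char Int)
  let c2 := word2.toList.foldl (fun d c => d.insert c (d.getD c 0 + 1)) (PySem.Dict.empty : PySem.Dict Char Int)
  c2.items.all (fun p => decide (p.2 ≤ c1.getD p.1 0))

-- ===== PRECONDITION & SPEC =====
def Spec_equals (word1 : String) (word2 : String) (out : Bool) : Prop := out = equals_alt word1 word2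
instance (word1 : String) (word2 : String) (out : Bool) : Decidable (Spec_equals word1 word2 out) := by unfold Spec_equals; infer_instance

-- ===== CLAIM (what is proved, stated in full; the proofs are below) =====
def Claim_equal_equals : Prop := ∀ (word1 : String) (word2 : String), Dom_equals word1 word2 → Spec_equals word1 word2 (equals word1 word2)

-- ===== LEMMAS AND PROOFS =====

-- A's first loop builds exactly counts of word1 (both branches are the same insert)
lemma equals_build_eq (l : List Char) :
    l.foldl (fun d c => if d.contains c then d.insert c (d.getD c 0 + 1) else d.insert c 1)
      (PySem.Dict.empty : PySem.Dict Char Int)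
    = PySem.Dict.counter l := by
  rw [← PySem.Dict.foldl_insert_getD_add_one_eq_counter]
  congr 1
  funext d c
  by_cases h : d.contains c = true
  · simp [h]
  · have hz : d.getD c 0 = 0 :=
      PySem.Dict.getD_of_not_contains d 0 (by simpa using h)
    simp [h, hz]

-- characterisation of A's streaming loop over any nonnegative-valued dict
lemma equalsGo_eq (cs : List Char) (d : PySem.Dict Char Int)
    (h : ∀ c, 0 ≤ d.getD c 0) :
    equalsGo cs d = decide (∀ c ∈ cs, (cs.count c : Int) ≤ d.getD c 0) := by
  induction cs generalizing d with
  | nil => simp [equalsGo]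
  | cons c rest ih =>
    have hcp : 0 < (c :: rest).count c := List.count_pos_iff.mpr (by simp)
    by_cases hc : d.contains c = true
    · by_cases hz : d.getD c 0 = 0
      · have hred : equalsGo (c :: rest) d = false := by
          simp [equalsGo, hc, hz]
        rw [hred]
        symm
        simp only [decide_eq_false_iff_not]
        intro hall
        have := hall c (by simp)
        rw [hz] at this
        omega
      · have hpos : 1 ≤ d.getD c 0 := lt_of_le_of_ne (h c) (Ne.symm hz)
        have hred : equalsGo (c :: rest) d
            = equalsGo rest (d.insert c (d.getD c 0 - 1)) := by
          simp [equalsGo, hc, hz]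
        rw [hred, ih _ (by
          intro x
          rw [PySem.Dict.getD_insert]
          split_ifs with hx
          · omega
          · exact h x)]
        congr 1
        apply propext
        constructor
        · intro hall x hx
          by_cases hxc : x = c
          · subst hxc
            rw [List.count_cons_self]
            by_cases hmem : x ∈ rest
            · have := hall x hmem
              rw [PySem.Dict.getD_insert, if_pos rfl] at this
              push_cast
              omega
            · rw [List.count_eq_zero_of_not_mem hmem]
              push_cast
              omega
          · have hmem : x ∈ rest := (List.mem_cons.1 hx).resolve_left hxc
            have := hall x hmem
            rw [PySem.Dict.getD_insert, if_neg hxc] at this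
            rw [List.count_cons_of_ne (Ne.symm hxc)]
            exact this
        · intro hall x hx
          have := hall x (List.mem_cons_of_mem _ hx)
          rw [PySem.Dict.getD_insert]
          by_cases hxc : x = c
          · subst hxc
            rw [if_pos rfl]
            rw [List.count_cons_self] at this
            push_cast at this ⊢
            omega
          · rw [if_neg hxc]
            rw [List.count_cons_of_ne (Ne.symm hxc)] at this
            exact this
    · have hz : d.getD c 0 = 0 :=
        PySem.Dict.getD_of_not_contains d 0 (by simpa using hc)
      have hred : equalsGo (c :: rest) d = false := by
        simp [equalsGo, hc]
      rw [hred]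
      symm
      simp only [decide_eq_false_iff_not]
      intro hall
      have := hall c (by simp)
      rw [hz] at this
      omega

-- ===== VERDICT (by name: the statement is the Claim_ definition above) =====
theorem equals_spec : Claim_equal_equals := by
  intro word1 word2 _
  show equals word1 word2 = equals_alt word1 word2
  simp only [equals, equals_alt]
  rw [equals_build_eq]
  simp only [PySem.Dict.foldl_insert_getD_add_one_eq_counter]
  rw [equalsGo_eq _ _ (by
    intro c
    rw [PySem.Dict.getD_counter]
    positivity)]
  apply Bool.eq_iff_iff.2
  simp [PySem.Dict.items_counter, List.all_map, List.all_eq_true,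
        PySem.Dict.getD_counter, PySem.Set.mem_ofList]
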